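-- pv_equiv track=rewrite | github.com/Wonji1/coding-test | etc/naver_secret.py | solution
-- ===== SOURCE A (Python) =====
-- def solution(m,k):
--     answer =''
--     list_m = list(m)
--     tmp = []
--     for i in range(len(k)):
--         idx = list_m.index(k[i])
--         list_m.remove(k[i])
--         tmp = list_m[:idx]
--         list_m = list_m[idx:]
--         answer += ''.join(tmp)
--     answer += ''.join(list_m)
--
--     return answer
-- ===== SOURCE B (Python) =====
-- def solution(m, k):
--     # single forward pass: greedily skip each next char of k when met in m
--     out = []
--     j = 0
--     for ch in m:
--         if j < len(k) and ch == k[j]: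
--             j += 1
--         else:
--             out.append(ch)
--     return ''.join(out)
-- ===== Notes on version B (the rewrite author's own statement) =====
-- stated objective: faster
-- what changed: Replaces the per-k-char list.index/remove/slice/join rebuilding of the remaining list with one greedy forward pass over m that keeps a single index into k and emits non-deleted characters; on inputs where A raises ValueError (k not a subsequence of m, excluded by Pre_) B returns the unmatched characters.
import Mathlib
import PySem

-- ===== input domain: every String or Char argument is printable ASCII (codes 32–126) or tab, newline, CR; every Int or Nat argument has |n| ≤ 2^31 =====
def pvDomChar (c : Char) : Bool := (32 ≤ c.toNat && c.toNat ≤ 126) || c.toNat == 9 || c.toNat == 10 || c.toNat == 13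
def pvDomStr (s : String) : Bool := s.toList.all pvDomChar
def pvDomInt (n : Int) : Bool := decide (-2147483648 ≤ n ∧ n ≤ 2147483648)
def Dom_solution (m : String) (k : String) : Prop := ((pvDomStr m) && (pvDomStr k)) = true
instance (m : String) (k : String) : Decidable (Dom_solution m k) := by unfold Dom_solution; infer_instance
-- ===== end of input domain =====

-- B replaces A's per-k-char index/remove/slice rebuilding with one greedy forward pass over m (faster: one pass).
-- Pre_ excludes exactly the inputs where A raises ValueError (k not a subsequence of m); B returns the unmatched characters there.

-- ===== PORT A =====
-- the for-i-in-range(len(k)) loop of A, step for step; state = (answer, list_m); none = ValueError from list.index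
def solutionLoopA (listm : List Char) (ks : List Char) (answer : List Char) : Option (List Char) :=
  match ks with
  | [] => some (answer ++ listm)                      -- answer += ''.join(list_m); return answer
  | c :: ks' =>
    match PySem.List.index? listm c with              -- idx = list_m.index(k[i])
    | none => none
    | some idx =>
      match PySem.List.remove? listm c with           -- list_m.remove(k[i])
      | none => none
      | some lm2 =>
        let tmp := PySem.List.slice lm2 none (some (idx : Int))   -- tmp = list_m[:idx]
        let lm3 := PySem.List.slice lm2 (some (idx : Int)) none   -- list_m = list_m[idx:]
        solutionLoopA lm3 ks' (answer ++ tmp)                     -- answer += ''.join(tmp)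

def solution (m : String) (k : String) : String :=
  ((solutionLoopA m.toList k.toList []).map String.ofList).getD ""

-- ===== PORT B =====
-- Source B's single loop over m with the index j into k, as a fold over m's characters
def solutionStepB (ks : List Char) (st : List Char × Nat) (ch : Char) : List Char × Nat :=
  match ks[st.2]? with
  | some c => if ch = c then (st.1, st.2 + 1) else (st.1 ++ [ch], st.2)
  | none => (st.1 ++ [ch], st.2)

def solution_alt (m : String) (k : String) : String :=
  String.ofList (m.toList.foldl (solutionStepB k.toList) ([], 0)).1

-- ===== PRECONDITION & SPEC =====
-- Pre_: A raises ValueError (list.index misses) exactly when k is not a subsequence of m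
def Pre_solution (m : String) (k : String) : Prop := k.toList.Sublist m.toList
instance (m : String) (k : String) : Decidable (Pre_solution m k) := by unfold Pre_solution; infer_instance

def pvWitness_solution : String × String := ("abcab", "ba")

def Spec_solution (m : String) (k : String) (out : String) : Prop := out = solution_alt m k
instance (m : String) (k : String) (out : String) : Decidable (Spec_solution m k out) := by unfold Spec_solution; infer_instance

-- ===== CLAIM (what is proved, stated in full; the proofs are below) =====
def Claim_equal_solution : Prop := ∀ (m : String) (k : String), Dom_solution m k → Pre_solution m k → Spec_solution m k (solution m k)

-- ===== LEMMAS AND PROOFS =====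

-- the greedy deletion both programs compute, in recursive form
def greedyDel : List Char → List Char → List Char
  | [], _ => []
  | c :: ms, [] => c :: greedyDel ms []
  | c :: ms, j :: js => if c = j then greedyDel ms js else c :: greedyDel ms (j :: js)

theorem greedyDel_nil (ms : List Char) : greedyDel ms [] = ms := by
  induction ms with
  | nil => rfl
  | cons c ms ih => simp [greedyDel, ih]

-- B's fold computes greedyDel on the rest of k
theorem foldB_eq (ks : List Char) (ms : List Char) : ∀ (out : List Char) (j : Nat),
    (ms.foldl (solutionStepB ks) (out, j)).1 = out ++ greedyDel ms (ks.drop j) := by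
  induction ms with
  | nil => intro out j; simp [greedyDel]
  | cons c ms ih =>
    intro out j
    rcases h : ks[j]? with _ | d
    · have hd : ks.drop j = [] := by
        have := List.getElem?_eq_none_iff.mp h
        simp [List.drop_eq_nil_iff]; omega
      have hd' : ∀ i, j ≤ i → ks[i]? = none := by
        intro i hi
        apply List.getElem?_eq_none_iff.mpr
        have := List.getElem?_eq_none_iff.mp h; omega
      -- once past the end of k, every later step just appends
      have tailnil : ∀ (ms' : List Char) (out' : List Char),
          (ms'.foldl (solutionStepB ks) (out', j)).1 = out' ++ ms' := by
        intro ms'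
        induction ms' with
        | nil => intro out'; simp
        | cons a as ih2 => intro out'; simp [List.foldl, solutionStepB, hd' j le_rfl, ih2]
      simp only [List.foldl, solutionStepB, h]
      rw [tailnil, hd, greedyDel_nil]; simp
    · obtain ⟨hlt, heq⟩ := List.getElem?_eq_some_iff.mp h
      have hdrop : ks.drop j = d :: ks.drop (j + 1) := by
        rw [List.drop_eq_getElem_cons hlt, heq]
      simp only [List.foldl, solutionStepB, h, hdrop, greedyDel]
      by_cases hc : c = d
      · simp [hc, ih]
      · simp [hc, ih, ← hdrop]

theorem solution_alt_eq (m k : String) :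
    solution_alt m k = String.ofList (greedyDel m.toList k.toList) := by
  unfold solution_alt
  rw [foldB_eq k.toList m.toList [] 0]
  simp

-- A's step: if c first occurs at idx in lm, greedyDel emits the prefix and recurses after it
theorem greedyDel_step (c : Char) (ks : List Char) :
    ∀ (pre suf : List Char), c ∉ pre →
      greedyDel (pre ++ c :: suf) (c :: ks) = pre ++ greedyDel suf ks := by
  intro pre
  induction pre with
  | nil => intro suf _; simp [greedyDel]
  | cons a pre ih =>
    intro suf hnm
    have hne : a ≠ c := by intro h; exact hnm (by simp [h])
    simp only [List.cons_append, greedyDel, if_neg hne]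
    rw [ih suf (by intro h; exact hnm (by simp [h]))]

-- sublist survives cutting at the first occurrence
theorem sublist_after_first (c : Char) (ks : List Char) :
    ∀ (pre suf : List Char), c ∉ pre → (c :: ks).Sublist (pre ++ c :: suf) → ks.Sublist suf := by
  intro pre
  induction pre with
  | nil =>
    intro suf _ h
    rw [List.nil_append] at h
    exact List.cons_sublist_cons.mp h
  | cons a pre ih =>
    intro suf hnm h
    have hne : c ≠ a := by intro hh; exact hnm (by simp [hh])
    cases h with
    | cons _ h' => exact ih suf (by intro hh; exact hnm (by simp [hh])) h'
    | cons₂ _ h' => exact absurd rfl hne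

-- A's loop computes greedyDel whenever k is a subsequence of the remaining list
theorem loopA_eq (ks : List Char) : ∀ (lm answer : List Char), ks.Sublist lm →
    solutionLoopA lm ks answer = some (answer ++ greedyDel lm ks) := by
  induction ks with
  | nil => intro lm answer _; simp [solutionLoopA, greedyDel_nil]
  | cons c ks ih =>
    intro lm answer hsub
    have hmem : c ∈ lm := hsub.mem (List.mem_cons_self ..)
    rcases hidx : PySem.List.index? lm c with _ | idx
    · exact absurd ((PySem.List.index?_eq_none_iff lm c).mp hidx) (by simp [hmem])
    · obtain ⟨pre, suf, hlm, hlen, hnp⟩ := (PySem.List.index?_eq_some_iff lm c idx).mp hidx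
      have hrem : PySem.List.remove? lm c = some (pre ++ suf) := by
        rw [PySem.List.remove?_eq_some_erase lm c hmem, hlm]
        rw [List.erase_append_right _ (by simpa using hnp)]
        simp [List.erase_cons_head]
      simp only [solutionLoopA, hidx, hrem]
      have htake : PySem.List.slice (pre ++ suf) none (some (idx : Int)) = pre := by
        rw [PySem.List.slice_to_natCast, ← hlen, List.take_left]
      have hdrop : PySem.List.slice (pre ++ suf) (some (idx : Int)) none = suf := by
        rw [PySem.List.slice_from_natCast, ← hlen, List.drop_left]
      rw [htake, hdrop]
      have hsuf : ks.Sublist suf := sublist_after_first c ks pre suf (by simpa using hnp) (hlm ▸ hsub)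
      rw [ih suf (answer ++ pre) hsuf, hlm, greedyDel_step c ks pre suf (by simpa using hnp)]
      simp

-- ===== VERDICT (by name: the statement is the Claim_ definition above) =====
theorem solution_spec : Claim_equal_solution := by
  intro m k _ hpre
  unfold Spec_solution solution
  rw [loopA_eq k.toList m.toList [] hpre, solution_alt_eq]
  simp
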